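-- pv_equiv track=rewrite | github.com/x746e/apue | shell_doctest.py | _replace_ellipsis
-- ===== SOURCE A (Python) =====
-- def _escape(s):
--     """
--     Replace special symbols in s, so that they match their literal meaning in
--     regex.
--     """
--     for sym in '\\.^$*+?{}[]|()':
--         s = s.replace(sym, '\\' + sym)
--     return s
--
-- def _replace_ellipsis(expected):
--     """
--     Replace `...` by `.*`.
--
--     If `...` is the only contents of the line, it may mean that the line is
--     optional.  But if we just replace `...` by `.*`, `\n` before and after `...`
--     will not match.  So the function is removing the line with only `...`,
--     remove that line and add `.*` to the end of previous one.
--     """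
--     lines = expected.splitlines()
--     def itr():
--         # `...` will be already escaped.
--         ELLIPSIS = _escape('...')
--         for line, next_line in zip(lines, lines[1:] + ['']):
--             if line == ELLIPSIS:
--                 continue
--             line = line.replace(ELLIPSIS, '.*')
--             if next_line == ELLIPSIS:
--                 line += '.*'
--             yield line
--     return '\n'.join(itr())
-- ===== SOURCE B (Python) =====
-- def _escape(s):
--     """
--     Replace special symbols in s, so that they match their literal meaning in
--     regex.
--     """
--     for sym in '\\.^$*+?{}[]|()':
--         s = s.replace(sym, '\\' + sym)
--     return s
--
-- def _replace_ellipsis(expected):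
--     """
--     Replace `...` by `.*` (one forward pass that back-patches the previous
--     kept line when a standalone-ellipsis line is met).
--     """
--     ELLIPSIS = _escape('...')
--     result = []
--     prev_ellipsis = False
--     for line in expected.splitlines():
--         if line == ELLIPSIS:
--             if result and not prev_ellipsis:
--                 result[-1] += '.*'
--             prev_ellipsis = True
--         else:
--             result.append(line.replace(ELLIPSIS, '.*'))
--             prev_ellipsis = False
--     return '\n'.join(result)
-- ===== Notes on version B (the rewrite author's own statement) =====
-- stated objective: simpler
-- what changed: Replaces A's generator over lines zipped with their successors (lookahead) by one forward pass with an accumulator and a prev-ellipsis flag that back-patches the wildcard suffix onto the previously kept line.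
import Mathlib
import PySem

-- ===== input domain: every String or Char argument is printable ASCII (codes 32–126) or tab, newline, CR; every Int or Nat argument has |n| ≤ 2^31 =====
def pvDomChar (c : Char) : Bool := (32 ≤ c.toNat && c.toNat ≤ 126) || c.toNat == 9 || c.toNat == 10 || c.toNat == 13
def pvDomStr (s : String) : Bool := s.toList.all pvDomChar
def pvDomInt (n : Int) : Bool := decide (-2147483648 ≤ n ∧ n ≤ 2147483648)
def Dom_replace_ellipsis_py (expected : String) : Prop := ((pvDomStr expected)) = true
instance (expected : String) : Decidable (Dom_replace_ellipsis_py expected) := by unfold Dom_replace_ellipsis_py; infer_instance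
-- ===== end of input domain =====

-- B replaces A's zip-with-successor lookahead by a single forward pass with an accumulator
-- and a prev-ellipsis flag that back-patches the previously kept line (objective: simpler).

-- ===== PORT A =====
-- shared module helper `_escape` (used by both Pythons to build ELLIPSIS)
def escape_py (s : String) : String :=
  List.foldl (fun t c => PySem.Str.replace t (String.ofList [c]) ("\\" ++ String.ofList [c])) s
    "\\.^$*+?{}[]|()".toList

-- the generator `itr()` of A, as recursion over the zipped (line, next_line) pairs
def replace_ellipsis_py_itr (E : String) : List (String × String) → List String
  | [] => []
  | (line, next_line) :: rest =>
      if line = E then replace_ellipsis_py_itr E rest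
      else
        let line' := PySem.Str.replace line E ".*"
        (if next_line = E then line' ++ ".*" else line') :: replace_ellipsis_py_itr E rest

def replace_ellipsis_py (expected : String) : String :=
  let lines := PySem.Str.splitlines expected
  let ELLIPSIS := escape_py "..."
  PySem.Str.join "\n" (replace_ellipsis_py_itr ELLIPSIS (lines.zip (lines.drop 1 ++ [""])))

-- ===== PORT B =====
-- one step of B's loop; state = (result, prev_ellipsis)
def replace_ellipsis_py_step (E : String) (st : List String × Bool) (line : String) :
    List String × Bool :=
  if line = E then
    if st.1 ≠ [] ∧ st.2 = false then
      (st.1.dropLast ++ [st.1.getLastD "" ++ ".*"], true)   -- result[-1] += '.*'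
    else (st.1, true)
  else (st.1 ++ [PySem.Str.replace line E ".*"], false)

def replace_ellipsis_py_alt (expected : String) : String :=
  let ELLIPSIS := escape_py "..."
  let st := List.foldl (replace_ellipsis_py_step ELLIPSIS) ([], false)
      (PySem.Str.splitlines expected)
  PySem.Str.join "\n" st.1

-- ===== PRECONDITION & SPEC =====
def Spec_replace_ellipsis_py (expected : String) (out : String) : Prop := out = replace_ellipsis_py_alt expected
instance (expected : String) (out : String) : Decidable (Spec_replace_ellipsis_py expected out) := by unfold Spec_replace_ellipsis_py; infer_instance

-- ===== CLAIM (what is proved, stated in full; the proofs are below) =====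
def Claim_equal_replace_ellipsis_py : Prop := ∀ (expected : String), Dom_replace_ellipsis_py expected → Spec_replace_ellipsis_py expected (replace_ellipsis_py expected)

-- ===== LEMMAS AND PROOFS =====

-- common intermediate: the list of yielded lines, by direct recursion on the lines
def pvAlist (E : String) : List String → List String
  | [] => []
  | line :: rest =>
      if line = E then pvAlist E rest
      else
        (let line' := PySem.Str.replace line E ".*"
         if rest.headD "" = E then line' ++ ".*" else line') :: pvAlist E rest

lemma pvItr_eq_alist (E : String) :
    ∀ ls : List String, replace_ellipsis_py_itr E (ls.zip (ls.drop 1 ++ [""])) = pvAlist E ls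
  | [] => rfl
  | [l] => by simp [replace_ellipsis_py_itr, pvAlist]
  | l :: r :: rs => by
      have ih := pvItr_eq_alist E (r :: rs)
      simp only [List.drop_succ_cons, List.drop_zero, List.cons_append, List.zip_cons_cons] at ih ⊢
      simp [replace_ellipsis_py_itr, pvAlist, ih]

lemma pvFold_eq_alist (E : String) (hE : E ≠ "") :
    ∀ (ls : List String) (a : List String) (p : Bool),
      (List.foldl (replace_ellipsis_py_step E) (a, p) ls).1 =
        (if ls.headD "" = E ∧ p = false ∧ a ≠ [] then a.dropLast ++ [a.getLastD "" ++ ".*"] else a)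
          ++ pvAlist E ls
  | [], a, p => by simp [pvAlist, Ne.symm hE]
  | line :: rest, a, p => by
      by_cases hl : line = E
      · by_cases hp : p = false ∧ a ≠ []
        · have ih := pvFold_eq_alist E hE rest (a.dropLast ++ [a.getLastD "" ++ ".*"]) true
          simp at ih
          simp [List.foldl_cons, replace_ellipsis_py_step, pvAlist, hl, hp.1, hp.2, ih]
        · have hq : ¬((a, p).1 ≠ [] ∧ (a, p).2 = false) := fun h => hp ⟨h.2, h.1⟩
          have ih := pvFold_eq_alist E hE rest a true
          simp at ih
          simp [List.foldl_cons, replace_ellipsis_py_step, pvAlist, hl, hq, hp, ih]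
      · have ih := pvFold_eq_alist E hE rest (a ++ [PySem.Str.replace line E ".*"]) false
        simp at ih
        simp [List.foldl_cons, replace_ellipsis_py_step, pvAlist, hl, ih]
        split_ifs <;> simp

set_option maxRecDepth 100000 in
lemma pvEllipsis_ne_empty : escape_py "..." ≠ "" := by decide

-- ===== VERDICT (by name: the statement is the Claim_ definition above) =====
theorem replace_ellipsis_py_spec : Claim_equal_replace_ellipsis_py := by
  intro expected _
  simp only [Spec_replace_ellipsis_py, replace_ellipsis_py, replace_ellipsis_py_alt]
  rw [pvItr_eq_alist, pvFold_eq_alist _ pvEllipsis_ne_empty]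
  simp
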